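-- pv_equiv track=rewrite | github.com/kaaylabs-v2/nexus-mastery | services/api/app/routers/conversations.py | _count_exchanges_in_mode
-- ===== SOURCE A (Python) =====
-- def _count_exchanges_in_mode(messages: list[dict], mode: str) -> int:
--     """Count how many user exchanges have happened in the current mode.
--
--     Walks backwards through messages. A mode boundary is detected when an
--     assistant message's _next_mode differs from the current mode AND is
--     followed by a user message (i.e. the user responded in a different mode).
--     This prevents counting user messages from the previous mode.
--     """
--     count = 0
--     found_boundary = False
--     for msg in reversed(messages):
--         # An assistant message whose _next_mode transitioned INTO the current
--         # mode marks the boundary — count user messages AFTER this point only.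
--         if msg.get("role") == "assistant":
--             stored = msg.get("_next_mode")
--             if stored and stored != mode:
--                 found_boundary = True
--                 break
--         if msg.get("role") == "user":
--             count += 1
--     return count
-- ===== SOURCE B (Python) =====
-- def _count_exchanges_in_mode(messages: list[dict], mode: str) -> int:
--     """Two staged passes: first locate the position just after the LAST mode
--     boundary (assistant message with a truthy _next_mode different from mode),
--     then count the user messages in the suffix from that position on."""
--     start = 0
--     for i, msg in enumerate(messages):
--         if msg.get("role") == "assistant":
--             nm = msg.get("_next_mode")
--             if nm and nm != mode:
--                 start = i + 1
--     return sum(1 for msg in messages[start:] if msg.get("role") == "user")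
-- ===== Notes on version B (the rewrite author's own statement) =====
-- stated objective: alternative
-- what changed: Replaces the backward scan with early break by two staged forward passes: one pass records the index just after the last mode boundary, a second pass counts user messages in the suffix after it.
import Mathlib
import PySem

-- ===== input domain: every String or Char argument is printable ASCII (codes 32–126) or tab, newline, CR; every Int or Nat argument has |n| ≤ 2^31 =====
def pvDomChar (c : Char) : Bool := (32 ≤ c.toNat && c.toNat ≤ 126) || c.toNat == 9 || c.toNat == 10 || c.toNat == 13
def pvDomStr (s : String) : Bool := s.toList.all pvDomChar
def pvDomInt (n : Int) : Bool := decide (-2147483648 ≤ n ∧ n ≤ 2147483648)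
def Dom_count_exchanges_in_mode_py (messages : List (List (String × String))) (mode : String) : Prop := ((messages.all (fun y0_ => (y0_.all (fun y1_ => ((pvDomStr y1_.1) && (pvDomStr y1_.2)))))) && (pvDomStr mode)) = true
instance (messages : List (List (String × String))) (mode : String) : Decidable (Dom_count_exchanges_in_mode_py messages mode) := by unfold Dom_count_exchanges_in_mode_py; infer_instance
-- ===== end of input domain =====

-- B replaces A's backward scan with early break by two staged forward passes (find index after last boundary, then count users in the suffix); objective: alternative decomposition, same cost.


-- ===== PORT A =====
-- msg.get(key) on an association-list dict (first match), as A's dict lookups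
def pvGetKey : List (String × String) → String → Option String
  | [], _ => none
  | (k, v) :: rest, key => if k == key then some v else pvGetKey rest key

-- 'stored and stored != mode' on an assistant message (Python truthiness of str)
def pvBoundary (m : List (String × String)) (mode : String) : Bool :=
  pvGetKey m "role" == some "assistant" &&
    (match pvGetKey m "_next_mode" with
     | some s => !(s == "") && !(s == mode)
     | none => false)

def pvIsUser (m : List (String × String)) : Bool :=
  pvGetKey m "role" == some "user"

-- A's loop over reversed(messages): accumulate count, break (returning count) at boundary
def pvALoop (mode : String) (count : Int) : List (List (String × String)) → Int
  | [] => count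
  | m :: rest =>
    if pvBoundary m mode then count
    else pvALoop mode (if pvIsUser m then count + 1 else count) rest

def count_exchanges_in_mode_py (messages : List (List (String × String))) (mode : String) : Int :=
  pvALoop mode 0 messages.reverse

-- ===== PORT B =====
-- B's msg.get: first matching pair via find?
def pvGetB (m : List (String × String)) (k : String) : Option String :=
  (m.find? (fun kv => kv.1 == k)).map Prod.snd

def pvBoundaryB (m : List (String × String)) (mode : String) : Bool :=
  match pvGetB m "role" with
  | some r =>
    r == "assistant" &&
      (match pvGetB m "_next_mode" with
       | some s => !(s == "") && !(s == mode)
       | none => false)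
  | none => false

-- B: pass 1 records (index, index-just-after-last-boundary); pass 2 counts users in the suffix
def count_exchanges_in_mode_py_alt (messages : List (List (String × String))) (mode : String) : Int :=
  let start :=
    (messages.foldl
      (fun (p : Nat × Nat) m => (p.1 + 1, if pvBoundaryB m mode then p.1 + 1 else p.2))
      (0, 0)).2
  ((messages.drop start).countP (fun m => pvGetB m "role" == some "user") : Int)

-- ===== PRECONDITION & SPEC =====
def Spec_count_exchanges_in_mode_py (messages : List (List (String × String))) (mode : String) (out : Int) : Prop := out = count_exchanges_in_mode_py_alt messages mode
instance (messages : List (List (String × String))) (mode : String) (out : Int) : Decidable (Spec_count_exchanges_in_mode_py messages mode out) := by unfold Spec_count_exchanges_in_mode_py; infer_instance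

-- ===== CLAIM (what is proved, stated in full; the proofs are below) =====
def Claim_equal_count_exchanges_in_mode_py : Prop := ∀ (messages : List (List (String × String))) (mode : String), Dom_count_exchanges_in_mode_py messages mode → Spec_count_exchanges_in_mode_py messages mode (count_exchanges_in_mode_py messages mode)

-- ===== LEMMAS AND PROOFS =====

-- B's lookup computes A's lookup
theorem pvGetB_eq (m : List (String × String)) (k : String) :
    pvGetB m k = pvGetKey m k := by
  induction m with
  | nil => rfl
  | cons kv rest ih =>
    obtain ⟨k', v⟩ := kv
    by_cases h : (k' == k) = true
    · simp [pvGetB, pvGetKey, List.find?, h]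
    · simp only [pvGetB, pvGetKey, List.find?] at *
      simp [h, ih]

theorem pvBoundaryB_eq (m : List (String × String)) (mode : String) :
    pvBoundaryB m mode = pvBoundary m mode := by
  unfold pvBoundaryB pvBoundary
  rw [pvGetB_eq, pvGetB_eq]
  cases pvGetKey m "role" with
  | none => simp
  | some r => simp

-- The A-loop's accumulator merely shifts the result.
theorem pvALoop_add (mode : String) (l : List (List (String × String))) :
    ∀ c : Int, pvALoop mode c l = c + pvALoop mode 0 l := by
  induction l with
  | nil => intro c; simp [pvALoop]
  | cons m rest ih =>
    intro c
    by_cases hb : pvBoundary m mode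
    · simp [pvALoop, hb]
    · by_cases hu : pvIsUser m
      · simp only [pvALoop, hb, hu, if_true, if_false, Bool.false_eq_true]
        rw [ih (c + 1), ih (0 + 1)]; ring
      · simp only [pvALoop, hb, hu, if_true, if_false, Bool.false_eq_true]
        exact ih c

-- the counting step of B's pass 1
def pvStep (mode : String) (p : Nat × Nat) (m : List (String × String)) : Nat × Nat :=
  (p.1 + 1, if pvBoundaryB m mode then p.1 + 1 else p.2)

theorem pvFold_fst (mode : String) (l : List (List (String × String))) :
    ∀ i s : Nat, (l.foldl (pvStep mode) (i, s)).1 = i + l.length := by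
  induction l with
  | nil => intro i s; simp
  | cons m rest ih =>
    intro i s
    simp only [List.foldl_cons, pvStep, ih]
    simp [Nat.add_comm, Nat.add_left_comm]

theorem pvFold_snd_le (mode : String) (l : List (List (String × String))) :
    ∀ i s : Nat, s ≤ i → (l.foldl (pvStep mode) (i, s)).2 ≤ i + l.length := by
  induction l with
  | nil => intro i s h; simpa using Nat.le_trans h (Nat.le_refl i)
  | cons m rest ih =>
    intro i s h
    simp only [List.foldl_cons, pvStep, List.length_cons]
    have : (if pvBoundaryB m mode then i + 1 else s) ≤ i + 1 := by
      split_ifs with hb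
      · exact Nat.le_refl _
      · omega
    have := ih (i + 1) _ this
    omega

-- main bridge: A's backward break-scan equals B's suffix user-count
theorem pvMain (mode : String) (l : List (List (String × String))) :
    pvALoop mode 0 l.reverse
      = (((l.drop ((l.foldl (pvStep mode) (0, 0)).2)).countP
            (fun m => pvGetB m "role" == some "user") : Nat) : Int) := by
  induction l using List.reverseRecOn with
  | nil => simp [pvALoop]
  | append_singleton l m ih =>
    have hfst : (l.foldl (pvStep mode) (0, 0)).1 = l.length := by
      simpa using pvFold_fst mode l 0 0
    have hle : (l.foldl (pvStep mode) (0, 0)).2 ≤ l.length := by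
      simpa using pvFold_snd_le mode l 0 0 (Nat.le_refl 0)
    rw [List.reverse_append]
    simp only [List.reverse_singleton, List.singleton_append, List.foldl_append,
      List.foldl_cons, List.foldl_nil]
    by_cases hb : pvBoundary m mode
    · have hbB : pvBoundaryB m mode = true := by rw [pvBoundaryB_eq]; exact hb
      rw [show pvALoop mode 0 (m :: l.reverse) = 0 by simp [pvALoop, hb]]
      have hsnd : (pvStep mode (l.foldl (pvStep mode) (0, 0)) m).2 = l.length + 1 := by
        simp [pvStep, hbB, hfst]
      rw [hsnd]
      rw [List.drop_eq_nil_of_le (by simp)]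
      simp
    · have hbB : pvBoundaryB m mode = false := by rw [pvBoundaryB_eq]; simpa using hb
      have hsnd : (pvStep mode (l.foldl (pvStep mode) (0, 0)) m).2
          = (l.foldl (pvStep mode) (0, 0)).2 := by simp [pvStep, hbB]
      rw [hsnd]
      rw [List.drop_append_of_le_length hle]
      rw [List.countP_append]
      rw [show pvALoop mode 0 (m :: l.reverse)
            = (if pvIsUser m then (1 : Int) else 0) + pvALoop mode 0 l.reverse by
        by_cases hu : pvIsUser m
        · simp only [pvALoop, hb, hu, if_true, if_false, Bool.false_eq_true]
          rw [pvALoop_add mode l.reverse (0 + 1)]; ring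
        · simp [pvALoop, hb, hu]]
      rw [ih]
      have hm : (List.countP (fun m => pvGetB m "role" == some "user") [m])
          = if pvIsUser m then 1 else 0 := by
        simp only [List.countP_cons, List.countP_nil, pvIsUser, pvGetB_eq]
        split_ifs with h <;> simp
      rw [hm]
      split_ifs <;> push_cast <;> ring

-- ===== VERDICT (by name: the statement is the Claim_ definition above) =====
theorem count_exchanges_in_mode_py_spec : Claim_equal_count_exchanges_in_mode_py := by
  intro messages mode _
  unfold Spec_count_exchanges_in_mode_py count_exchanges_in_mode_py count_exchanges_in_mode_py_alt
  exact pvMain mode messages
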